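-- pv_equiv track=rewrite | github.com/MPIfR-BDG/trapum-pipeline-wrapper | pipelines/trapum_search_pipeline/webpage_peasoup_pipeline_ddplan_pulsarx.py | decide_fft_size
-- ===== SOURCE A (Python) =====
-- def decide_fft_size(filterbank_headers):
--     nsamples = 0
--     for filterbank_header in filterbank_headers:
--         nsamples += filterbank_header['nsamples']
--     bit_length = int(nsamples).bit_length()
--     if 2**bit_length != 2 * int(nsamples):
--         return 2**bit_length
--     else:
--         return int(nsamples)
-- ===== SOURCE B (Python) =====
-- def decide_fft_size(filterbank_headers):
--     n = int(sum(header['nsamples'] for header in filterbank_headers))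
--     k = 0
--     while 2 ** k < n:
--         k += 1
--     return 2 ** k
-- ===== Notes on version B (the rewrite author's own statement) =====
-- stated objective: idiomatic
-- what changed: B sums the nsamples with a generator expression and finds the smallest power of two >= the total by an explicit doubling search, instead of A's bit_length closed form with a power-of-two correction branch.
-- outside the precondition, e.g. on decide_fft_size([{'nsamples': -3}]): A returns 4, B returns 1; on decide_fft_size([{}]): A raises KeyError, B raises KeyError
import Mathlib
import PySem

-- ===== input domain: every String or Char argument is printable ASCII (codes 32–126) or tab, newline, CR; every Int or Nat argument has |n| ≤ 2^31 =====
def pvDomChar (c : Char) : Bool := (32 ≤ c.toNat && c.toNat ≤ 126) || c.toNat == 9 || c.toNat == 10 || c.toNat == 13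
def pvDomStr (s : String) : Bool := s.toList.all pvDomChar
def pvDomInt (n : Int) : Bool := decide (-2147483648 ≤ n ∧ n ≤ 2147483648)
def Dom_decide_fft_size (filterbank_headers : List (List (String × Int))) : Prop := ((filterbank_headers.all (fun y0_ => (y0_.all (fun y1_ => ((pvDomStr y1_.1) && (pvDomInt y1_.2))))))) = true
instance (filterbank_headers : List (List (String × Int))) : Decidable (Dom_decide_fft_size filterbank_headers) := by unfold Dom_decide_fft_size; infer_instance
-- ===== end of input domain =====

-- B replaces A's bit_length closed form (plus power-of-two correction branch) by an
-- explicit doubling search for the smallest power of two >= the summed nsamples (idiomatic).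


-- ===== PORT A =====
def decide_fft_size (filterbank_headers : List (List (String × Int))) : Int :=
  let nsamples := filterbank_headers.foldl
    (fun acc h => acc + (PySem.Dict.mk h).getD "nsamples" 0) 0
  let bit_length := PySem.Int.bitLength nsamples
  if (2 : Int) ^ bit_length ≠ 2 * nsamples then (2 : Int) ^ bit_length else nsamples

-- ===== PORT B =====
-- the 'while 2 ** k < n: k += 1' loop of Source B
def pvGrow (n : Int) (k : Nat) : Int :=
  if (2 : Int) ^ k < n then pvGrow n (k + 1) else (2 : Int) ^ k
termination_by (n.toNat + 1) - 2 ^ k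
decreasing_by
  have h2 : ((2 ^ k : Nat) : Int) < n := by push_cast; omega
  have h3 : 2 ^ k < n.toNat := by omega
  have h5 : 1 ≤ 2 ^ k := Nat.one_le_two_pow
  omega

def decide_fft_size_alt (filterbank_headers : List (List (String × Int))) : Int :=
  let n := (filterbank_headers.map (fun h => (PySem.Dict.mk h).getD "nsamples" 0)).sum
  pvGrow n 0

-- ===== PRECONDITION & SPEC =====
-- Pre_ excludes headers missing the 'nsamples' key (A raises KeyError there) and inputs whose
-- summed nsamples is negative, which lie outside the natural domain of sample counts.
def Pre_decide_fft_size (filterbank_headers : List (List (String × Int))) : Prop :=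
  (∀ h ∈ filterbank_headers, ((PySem.Dict.mk h).get? "nsamples").isSome = true) ∧
  0 ≤ (filterbank_headers.map (fun h => (PySem.Dict.mk h).getD "nsamples" 0)).sum
instance (filterbank_headers : List (List (String × Int))) : Decidable (Pre_decide_fft_size filterbank_headers) := by unfold Pre_decide_fft_size; infer_instance

def pvWitness_decide_fft_size : (List (List (String × Int))) := [[("nsamples", 3)]]

def Spec_decide_fft_size (filterbank_headers : List (List (String × Int))) (out : Int) : Prop := out = decide_fft_size_alt filterbank_headers
instance (filterbank_headers : List (List (String × Int))) (out : Int) : Decidable (Spec_decide_fft_size filterbank_headers out) := by unfold Spec_decide_fft_size; infer_instance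

-- ===== CLAIM (what is proved, stated in full; the proofs are below) =====
def Claim_equal_decide_fft_size : Prop := ∀ (filterbank_headers : List (List (String × Int))), Dom_decide_fft_size filterbank_headers → Pre_decide_fft_size filterbank_headers → Spec_decide_fft_size filterbank_headers (decide_fft_size filterbank_headers)

-- ===== LEMMAS AND PROOFS =====

-- A's loop accumulates the same total as B's sum-of-map.
theorem pv_foldl_sum (hs : List (List (String × Int))) :
    hs.foldl (fun acc h => acc + (PySem.Dict.mk h).getD "nsamples" 0) 0
      = (hs.map (fun h => (PySem.Dict.mk h).getD "nsamples" 0)).sum := by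
  exact (PySem.List.foldl_add hs (fun h => (PySem.Dict.mk h).getD "nsamples" 0) 0).trans (by simp)

theorem pvGrow_eq (n : Int) (hn : 0 ≤ n) :
    ∀ k : Nat, (∀ j < k, (2 : Int) ^ j < n) →
      pvGrow n k =
        (if (2 : Int) ^ (PySem.Int.bitLength n) ≠ 2 * n then (2 : Int) ^ (PySem.Int.bitLength n) else n) := by
  intro k hk
  fun_induction pvGrow n k with
  | case1 k hlt ih =>
      refine ih ?_
      intro j hj
      rcases Nat.lt_succ_iff_lt_or_eq.mp hj with h | h
      · exact hk j h
      · exact h ▸ hlt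
  | case2 k hle =>
      rw [not_lt] at hle
      rcases Nat.eq_zero_or_pos k with hk0 | hkpos
      · subst hk0
        simp only [pow_zero] at hle
        interval_cases n
        · decide
        · decide
      · -- 2^(k-1) < n ≤ 2^k, n ≥ 2
        have hlow : (2 : Int) ^ (k - 1) < n := hk (k - 1) (by omega)
        have hcast : ∀ m : Nat, ((2 ^ m : Nat) : Int) = (2 : Int) ^ m := by intro m; push_cast; ring
        have hnat_low : 2 ^ (k - 1) < n.toNat := by
          have := hcast (k - 1); omega
        have hnat_hi : n.toNat ≤ 2 ^ k := by
          have := hcast k; omega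
        have habs : n.natAbs = n.toNat := by omega
        set bl := PySem.Int.bitLength n with hbl
        have hne : n ≠ 0 := by
          have : (1:Int) ≤ (2:Int)^(k-1) := one_le_pow₀ (by norm_num)
          omega
        have hub : n.natAbs < 2 ^ bl := PySem.Int.lt_two_pow_bitLength n
        have hlb : 2 ^ (bl - 1) ≤ n.natAbs := PySem.Int.two_pow_bitLength_le n hne
        have hblpos : 1 ≤ bl := by
          by_contra h
          have : bl = 0 := by omega
          rw [this] at hub; omega
        by_cases hpow : n = (2 : Int) ^ k
        · -- bl = k + 1, A takes the else branch
          have hnn : n.toNat = 2 ^ k := by have := hcast k; omega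
          have h1 : k < bl := by
            have : 2 ^ k < 2 ^ bl := by omega
            exact (Nat.pow_lt_pow_iff_right (by norm_num)).mp this
          have h2 : bl - 1 ≤ k := by
            have : 2 ^ (bl - 1) ≤ 2 ^ k := by omega
            exact (Nat.pow_le_pow_iff_right (by norm_num)).mp this
          have hblk : bl = k + 1 := by omega
          have : (2 : Int) ^ bl = 2 * n := by
            rw [hblk, hpow]; ring
          simp [this, hpow]
        · -- 2^(k-1) < n < 2^k, bl = k, A takes the if branch
          have hnlt : n.toNat < 2 ^ k := by
            have := hcast k
            have : n.toNat ≠ 2 ^ k := by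
              intro h; apply hpow
              have := hcast k; omega
            omega
          have h1 : bl - 1 < k := by
            have : 2 ^ (bl - 1) < 2 ^ k := by omega
            exact (Nat.pow_lt_pow_iff_right (by norm_num)).mp this
          have h2 : k - 1 < bl := by
            have : 2 ^ (k - 1) < 2 ^ bl := by omega
            exact (Nat.pow_lt_pow_iff_right (by norm_num)).mp this
          have hblk : bl = k := by omega
          have hne2 : (2 : Int) ^ bl ≠ 2 * n := by
            rw [hblk]
            intro h
            have h2n : 2 * n.toNat = 2 ^ k := by
              have := hcast k; omega
            have : 2 ^ (k - 1) * 2 = 2 ^ k := by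
              rw [← pow_succ]; congr 1; omega
            omega
          rw [if_pos hne2, hblk]

theorem decide_fft_size_spec : Claim_equal_decide_fft_size := by
  intro hs _ hpre
  unfold Spec_decide_fft_size decide_fft_size decide_fft_size_alt
  rw [pv_foldl_sum]
  set n := (hs.map (fun h => (PySem.Dict.mk h).getD "nsamples" 0)).sum with hn
  have hnn : 0 ≤ n := hpre.2
  exact (pvGrow_eq n hnn 0 (by intro j hj; omega)).symm
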